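-- pv_equiv track=rewrite | github.com/ParthBandivadekar/protein_ligand_md | scripts/fix_protonation.py | determine_histidine_type
-- ===== SOURCE A (Python) =====
-- def determine_histidine_type(lines):
--     has_hd1 = any(L[12:16].strip() == "HD1" for L in lines)
--     has_he2 = any(L[12:16].strip() == "HE2" for L in lines)
--     if has_hd1 and has_he2:
--         return "HIP"
--     if has_hd1:
--         return "HID"
--     if has_he2:
--         return "HIE"
--     return "HIS"
-- ===== SOURCE B (Python) =====
-- def determine_histidine_type(lines):
--     # Single early-exit pass maintaining both flags, then a table lookup
--     # indexed arithmetically instead of a branch cascade.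
--     hd1 = False
--     he2 = False
--     for L in lines:
--         if hd1 and he2:
--             break
--         name = L[12:16].strip()
--         hd1 = hd1 or name == "HD1"
--         he2 = he2 or name == "HE2"
--     return ("HIS", "HID", "HIE", "HIP")[hd1 + 2 * he2]
-- ===== Notes on version B (the rewrite author's own statement) =====
-- stated objective: alternative
-- what changed: B replaces A's two independent any() scans and four-branch return cascade with a single early-exiting pass that accumulates both flags at once and a table lookup indexed by hd1 + 2*he2.
import Mathlib
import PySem

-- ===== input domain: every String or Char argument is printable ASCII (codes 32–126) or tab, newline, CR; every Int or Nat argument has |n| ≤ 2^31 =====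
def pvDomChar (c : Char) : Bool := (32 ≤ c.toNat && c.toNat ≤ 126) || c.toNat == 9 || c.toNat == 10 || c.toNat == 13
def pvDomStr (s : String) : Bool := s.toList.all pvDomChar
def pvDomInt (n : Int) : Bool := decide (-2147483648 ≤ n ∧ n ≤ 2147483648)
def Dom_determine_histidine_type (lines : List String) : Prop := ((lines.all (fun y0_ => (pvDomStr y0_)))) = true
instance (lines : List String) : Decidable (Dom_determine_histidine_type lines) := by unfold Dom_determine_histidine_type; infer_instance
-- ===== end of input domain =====

-- B replaces A's two any() scans and four-way return cascade with one early-exiting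
-- pass accumulating both flags and a table lookup indexed by hd1 + 2*he2; same result.

-- ===== PORT A =====
-- L[12:16].strip()
def pvName_determine_histidine_type (L : String) : String :=
  PySem.Str.strip (PySem.Str.slice L (some 12) (some 16))

def determine_histidine_type (lines : List String) : String :=
  let has_hd1 := lines.any (fun L => pvName_determine_histidine_type L == "HD1")
  let has_he2 := lines.any (fun L => pvName_determine_histidine_type L == "HE2")
  if has_hd1 && has_he2 then "HIP"
  else if has_hd1 then "HID"
  else if has_he2 then "HIE"
  else "HIS"

-- ===== PORT B =====
-- the for-loop of Source B: early break once both flags are set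
def pvAltLoop_determine_histidine_type : List String → Bool → Bool → Bool × Bool
  | [], hd1, he2 => (hd1, he2)
  | L :: rest, hd1, he2 =>
    if hd1 && he2 then (hd1, he2)
    else
      let name := pvName_determine_histidine_type L
      pvAltLoop_determine_histidine_type rest (hd1 || (name == "HD1")) (he2 || (name == "HE2"))

def determine_histidine_type_alt (lines : List String) : String :=
  let p := pvAltLoop_determine_histidine_type lines false false
  -- ("HIS","HID","HIE","HIP")[hd1 + 2*he2]: the index is always in range 0..3,
  -- so the out-of-range default of pyGet? is never used
  (PySem.List.pyGet? ["HIS", "HID", "HIE", "HIP"]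
    ((if p.1 then 1 else 0) + 2 * (if p.2 then 1 else 0))).getD ""

-- ===== PRECONDITION & SPEC =====
def Spec_determine_histidine_type (lines : List String) (out : String) : Prop := out = determine_histidine_type_alt lines
instance (lines : List String) (out : String) : Decidable (Spec_determine_histidine_type lines out) := by unfold Spec_determine_histidine_type; infer_instance

-- ===== CLAIM (what is proved, stated in full; the proofs are below) =====
def Claim_equal_determine_histidine_type : Prop := ∀ (lines : List String), Dom_determine_histidine_type lines → Spec_determine_histidine_type lines (determine_histidine_type lines)

-- ===== LEMMAS AND PROOFS =====
theorem pvAltLoop_eq_any (lines : List String) (hd1 he2 : Bool) :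
    pvAltLoop_determine_histidine_type lines hd1 he2 =
      (hd1 || lines.any (fun L => pvName_determine_histidine_type L == "HD1"),
       he2 || lines.any (fun L => pvName_determine_histidine_type L == "HE2")) := by
  induction lines generalizing hd1 he2 with
  | nil => simp [pvAltLoop_determine_histidine_type]
  | cons L rest ih =>
    by_cases h : hd1 && he2
    · obtain ⟨h1, h2⟩ := Bool.and_eq_true_iff.mp h
      simp [pvAltLoop_determine_histidine_type, h1, h2]
    · simp only [pvAltLoop_determine_histidine_type, h, if_neg, Bool.false_eq_true,
        not_false_iff, ite_false, ih, List.any_cons]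
      cases hd1 <;> cases he2 <;> simp [Bool.or_assoc]

-- ===== VERDICT (by name: the statement is the Claim_ definition above) =====
theorem determine_histidine_type_spec : Claim_equal_determine_histidine_type := by
  intro lines _
  unfold Spec_determine_histidine_type determine_histidine_type determine_histidine_type_alt
  rw [pvAltLoop_eq_any]
  rcases Bool.eq_false_or_eq_true (lines.any (fun L => pvName_determine_histidine_type L == "HD1")) with h1 | h1 <;>
    rcases Bool.eq_false_or_eq_true (lines.any (fun L => pvName_determine_histidine_type L == "HE2")) with h2 | h2 <;>
      simp [h1, h2, PySem.List.pyGet?, PySem.List.pyIdx?]
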